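-- pv_equiv track=rewrite | github.com/silach53/Scheduling_task | Hybrid.py | hybrid_graph_coloring
-- ===== SOURCE A (Python) =====
-- def find_smallest_available_color(adjacency_matrix, colors, vertex):
--     used_colors = [False] * len(adjacency_matrix)
--
--     for neighbor in range(len(adjacency_matrix[vertex])):
--         if adjacency_matrix[vertex][neighbor] == 1 and colors[neighbor] != -1:
--             used_colors[colors[neighbor]] = True
--
--     for color in range(len(used_colors)):
--         if not used_colors[color]:
--             return color
--
--     return -1
--
-- def hybrid_graph_coloring(adjacency_matrix):
--     n = len(adjacency_matrix)
--     colors = [-1] * n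
--
--     # Apply greedy algorithm for initial coloring
--     for vertex in range(n):
--         colors[vertex] = find_smallest_available_color(adjacency_matrix, colors, vertex)
--
--     # Define local search function
--     def local_search(current_colors):
--         for vertex in range(n):
--             original_color = current_colors[vertex]
--             best_color = original_color
--             min_conflicts = float('inf')
--
--             for color in range(n):
--                 if color == original_color:
--                     continue
--
--                 current_colors[vertex] = color
--                 conflicts = 0
--
--                 for neighbor in range(len(adjacency_matrix[vertex])):
--                     if adjacency_matrix[vertex][neighbor] == 1 and current_colors[neighbor] == color:
--                         conflicts += 1
--
--                 if conflicts < min_conflicts: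
--                     min_conflicts = conflicts
--                     best_color = color
--
--             current_colors[vertex] = best_color
--
--     # Apply local search to improve the coloring
--     local_search(colors)
--
--     return colors
-- ===== SOURCE B (Python) =====
-- def hybrid_graph_coloring(adjacency_matrix):
--     n = len(adjacency_matrix)
--     colors = []
--     # Greedy phase: for each vertex, the smallest color not used by an
--     # already-colored neighbor (a set + counting upward, no boolean array).
--     for v, row in enumerate(adjacency_matrix):
--         used = {colors[j] for j, a in enumerate(row) if a == 1 and j < v}
--         c = 0
--         while c in used:
--             c += 1
--         colors.append(c)
--     # Local-search phase: count each neighbor color once per vertex, then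
--     # pick the first min-conflict color != current (one pass, no recount
--     # per candidate).  A self-loop adds the same constant to every
--     # candidate's conflict count, so it never affects the argmin.
--     for v, row in enumerate(adjacency_matrix):
--         cnt = {}
--         for j, a in enumerate(row):
--             if a == 1 and j != v:
--                 cnt[colors[j]] = cnt.get(colors[j], 0) + 1
--         best = None
--         bestk = None
--         for c in range(n):
--             if c == colors[v]:
--                 continue
--             k = cnt.get(c, 0)
--             if bestk is None or k < bestk:
--                 best, bestk = c, k
--         if best is not None:
--             colors[v] = best
--     return colors
-- ===== Notes on version B (the rewrite author's own statement) =====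
-- stated objective: faster
-- what changed: The greedy phase builds the neighbor-color set and counts up to the first free color instead of filling and scanning a boolean array, and the local-search phase counts each vertex's neighbor colors once into a dict and picks the first min-conflict candidate in a single argmin pass, instead of re-scanning all neighbors for every candidate color (the constant self-loop offset cannot change the argmin).
import Mathlib
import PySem

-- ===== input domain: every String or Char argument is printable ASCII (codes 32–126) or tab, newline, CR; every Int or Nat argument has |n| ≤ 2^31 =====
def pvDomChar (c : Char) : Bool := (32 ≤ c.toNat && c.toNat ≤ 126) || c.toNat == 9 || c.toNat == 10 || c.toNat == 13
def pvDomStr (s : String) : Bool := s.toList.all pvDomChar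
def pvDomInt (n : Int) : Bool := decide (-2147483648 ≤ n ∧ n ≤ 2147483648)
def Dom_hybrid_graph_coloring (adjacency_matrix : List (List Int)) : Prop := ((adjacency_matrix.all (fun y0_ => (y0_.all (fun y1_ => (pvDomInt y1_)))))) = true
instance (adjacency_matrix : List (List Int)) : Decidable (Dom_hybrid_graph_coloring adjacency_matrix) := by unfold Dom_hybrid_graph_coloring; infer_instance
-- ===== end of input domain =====

-- B replaces A's per-candidate conflict recount (O(n) per candidate color, O(n^3) total)
-- by one neighbor-color count per vertex plus a single argmin pass (O(n^2) total); same output.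

-- ===== PORT A =====
-- find_smallest_available_color, first loop: marks used_colors[colors[neighbor]].
-- The marked value satisfies 0 ≤ colors[j] < n on every reachable call (greedy colors are -1 or small
-- non-negative), so '.toNat' as the write index is exact there.
def pvUsedColors (adjacency_matrix : List (List Int)) (colors : List Int) (vertex : Int) : List Bool :=
  let row := PySem.List.pyGetD adjacency_matrix vertex []
  (PySem.List.pyRange 0 row.length 1).foldl
    (fun used j =>
      if PySem.List.pyGetD row j 0 = 1 ∧ PySem.List.pyGetD colors j 0 ≠ -1 then
        used.set (PySem.List.pyGetD colors j 0).toNat true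
      else used)
    (List.replicate adjacency_matrix.length false)

-- second loop: first color with used_colors[color] false, else -1
def pvFindSmallest (adjacency_matrix : List (List Int)) (colors : List Int) (vertex : Int) : Int :=
  let used := pvUsedColors adjacency_matrix colors vertex
  match (PySem.List.pyRange 0 used.length 1).find? (fun c => !(PySem.List.pyGetD used c false)) with
  | some c => c
  | none => -1

def pvConflicts (row : List Int) (cur : List Int) (color : Int) : Int :=
  (PySem.List.pyRange 0 row.length 1).foldl
    (fun conflicts j =>
      if PySem.List.pyGetD row j 0 = 1 ∧ PySem.List.pyGetD cur j 0 = color then conflicts + 1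
      else conflicts) 0

-- one candidate color of the local-search inner loop; float('inf') is modeled as 'none' in the
-- Option Int minimum
def pvLocalBody (row colors : List Int) (vertex orig : Int) (st : Int × Option Int) (c : Int) :
    Int × Option Int :=
  if c = orig then st
  else
    let cur := colors.set vertex.toNat c
    let conflicts := pvConflicts row cur c
    match st.2 with
    | none => (c, some conflicts)
    | some m => if conflicts < m then (c, some conflicts) else st

-- local_search body for one vertex; the final 'current_colors[vertex] = best_color' is the
-- trailing set (vertex ≥ 0 here, so '.toNat' as the write index is exact)
def pvLocalStep (adjacency_matrix : List (List Int)) (n : Int) (colors : List Int) (vertex : Int) : List Int :=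
  let row := PySem.List.pyGetD adjacency_matrix vertex []
  let orig := PySem.List.pyGetD colors vertex 0
  let st := (PySem.List.pyRange 0 n 1).foldl (pvLocalBody row colors vertex orig) (orig, none)
  colors.set vertex.toNat st.1

def hybrid_graph_coloring (adjacency_matrix : List (List Int)) : List Int :=
  let n : Int := adjacency_matrix.length
  let colors := (PySem.List.pyRange 0 n 1).foldl
    (fun colors vertex => colors.set vertex.toNat (pvFindSmallest adjacency_matrix colors vertex))
    (List.replicate adjacency_matrix.length (-1))
  (PySem.List.pyRange 0 n 1).foldl (pvLocalStep adjacency_matrix n) colors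

-- ===== PORT B =====
-- 'while c in used: c += 1'; fuel used.length + 1 is exact: the strictly increasing counter can hit
-- the set at most |used| times.
def pvMexWhile (used : PySem.Set Int) (c : Int) (fuel : Nat) : Int :=
  match fuel with
  | 0 => c
  | fuel' + 1 => if PySem.Set.contains used c then pvMexWhile used (c + 1) fuel' else c

def pvGreedyStepB (colors : List Int) (v : Int) (row : List Int) : List Int :=
  let used : PySem.Set Int :=
    PySem.Set.ofList ((PySem.List.enumerate row 0).filterMap
      (fun ja => if ja.2 = 1 ∧ ja.1 < v then some (PySem.List.pyGetD colors ja.1 0) else none))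
  colors ++ [pvMexWhile used 0 (used.length + 1)]

-- one candidate color of B's single argmin pass (k = cnt.get(c, 0))
def pvSearchBody (cnt : PySem.Dict Int Int) (cv : Int) (st : Option Int × Option Int) (c : Int) :
    Option Int × Option Int :=
  if c = cv then st
  else
    let k := cnt.getD c 0
    match st.2 with
    | none => (some c, some k)
    | some bk => if k < bk then (some c, some k) else st

def pvSearchStepB (n : Int) (colors : List Int) (v : Int) (row : List Int) : List Int :=
  let cnt : PySem.Dict Int Int :=
    (PySem.List.enumerate row 0).foldl
      (fun d ja =>
        if ja.2 = 1 ∧ ja.1 ≠ v then d.modify (PySem.List.pyGetD colors ja.1 0) 0 (· + 1) else d)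
      PySem.Dict.empty
  let cv := PySem.List.pyGetD colors v 0
  let st := (PySem.List.pyRange 0 n 1).foldl (pvSearchBody cnt cv) (none, none)
  match st.1 with
  | some b => colors.set v.toNat b   -- v ≥ 0 here, '.toNat' write index exact
  | none => colors

def hybrid_graph_coloring_alt (adjacency_matrix : List (List Int)) : List Int :=
  let n : Int := adjacency_matrix.length
  let colors := (PySem.List.enumerate adjacency_matrix 0).foldl
    (fun colors vr => pvGreedyStepB colors vr.1 vr.2) []
  (PySem.List.enumerate adjacency_matrix 0).foldl
    (fun colors vr => pvSearchStepB n colors vr.1 vr.2) colors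

-- ===== PRECONDITION & SPEC =====
-- Pre_ excludes matrices where some row carries the entry 1 at a column index ≥ len(matrix):
-- Python A (and B) then raise IndexError on colors[neighbor]; entries other than 1 beyond that
-- bound are skipped by the short-circuited guards and stay admitted.
def Pre_hybrid_graph_coloring (adjacency_matrix : List (List Int)) : Prop :=
  ∀ row ∈ adjacency_matrix, ∀ j : Nat, j < row.length → adjacency_matrix.length ≤ j →
    row.getD j 0 ≠ 1
instance (adjacency_matrix : List (List Int)) : Decidable (Pre_hybrid_graph_coloring adjacency_matrix) := by
  unfold Pre_hybrid_graph_coloring; infer_instance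

def pvWitness_hybrid_graph_coloring : List (List Int) := [[0, 1], [1, 0]]

def Spec_hybrid_graph_coloring (adjacency_matrix : List (List Int)) (out : List Int) : Prop := out = hybrid_graph_coloring_alt adjacency_matrix
instance (adjacency_matrix : List (List Int)) (out : List Int) : Decidable (Spec_hybrid_graph_coloring adjacency_matrix out) := by unfold Spec_hybrid_graph_coloring; infer_instance

-- ===== CLAIM (what is proved, stated in full; the proofs are below) =====
def Claim_equal_hybrid_graph_coloring : Prop := ∀ (adjacency_matrix : List (List Int)), Dom_hybrid_graph_coloring adjacency_matrix → Pre_hybrid_graph_coloring adjacency_matrix → Spec_hybrid_graph_coloring adjacency_matrix (hybrid_graph_coloring adjacency_matrix)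

-- ===== LEMMAS AND PROOFS =====

-- a greedy prefix: the vertex j got a color in [0, j]
def pvGood (cb : List Int) : Prop := ∀ j (_ : j < cb.length), 0 ≤ cb.getD j 0 ∧ cb.getD j 0 ≤ (j : Int)

-- enumerate as a map over the index range (lets one loop shape be rewritten into the other)
theorem pvEnumerate_eq {α : Type} (d : α) :
    ∀ (l : List α) (s : Int), PySem.List.enumerate l s
      = (PySem.List.pyRange s (s + l.length) 1).map (fun j => (j, l.getD (j - s).toNat d)) := by
  intro l
  induction l with
  | nil => intro s; simp [PySem.List.enumerate_nil]
  | cons x xs ih =>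
    intro s
    rw [PySem.List.enumerate_cons, PySem.List.pyRange_one_cons (by simp), List.map_cons, ih (s + 1)]
    refine congrArg₂ _ (by simp) ?_
    have harg : s + ((x :: xs).length : Int) = (s + 1) + (xs.length : Int) := by simp; ring
    rw [harg]
    refine List.map_congr_left ?_
    intro j hj
    rw [PySem.List.mem_pyRange_one] at hj
    have h1 : (j - s).toNat = (j - (s + 1)).toNat + 1 := by omega
    simp [h1]

-- value of the used_colors boolean array after the marking loop
theorem pvFoldSet_getD (P : Int → Prop) [DecidablePred P] (idx : Int → Nat) :
    ∀ (L : List Int) (u : List Bool) (c : Nat), c < u.length →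
      ((L.foldl (fun used j => if P j then used.set (idx j) true else used) u).getD c false)
        = (u.getD c false || L.any (fun j => decide (P j) && (idx j == c))) := by
  intro L
  induction L with
  | nil => simp
  | cons j L ih =>
    intro u c hc
    simp only [List.foldl_cons, List.any_cons]
    by_cases hP : P j
    · rw [if_pos hP, ih (u.set (idx j) true) c (by simpa using hc)]
      have hset : (u.set (idx j) true).getD c false = (u.getD c false || (idx j == c)) := by
        by_cases he : idx j = c
        · subst he; simp [List.getD_eq_getElem?_getD, hc]
        · simp [List.getD_eq_getElem?_getD, he, Bool.or_comm]
      rw [hset]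
      simp [hP, Bool.or_assoc]
    · rw [if_neg hP, ih u c hc]
      simp [hP]

-- find? over range(a, b) returns the first element satisfying p
theorem pvFind?_pyRange (p : Int → Bool) (a0 b m : Int)
    (hp : p m = true) (hlt : ∀ k, a0 ≤ k → k < m → p k = false) (hmb : m < b) :
    ∀ (fuel : Nat) (a : Int), a0 ≤ a → a ≤ m → m - a ≤ (fuel : Int) →
      (PySem.List.pyRange a b 1).find? p = some m := by
  intro fuel
  induction fuel with
  | zero =>
    intro a h0 h1 h2
    have : a = m := by omega
    subst this
    rw [PySem.List.pyRange_one_cons (by omega), List.find?_cons_of_pos hp]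
  | succ k ih =>
    intro a h0 h1 h2
    rcases eq_or_lt_of_le h1 with he | hlt'
    · subst he; rw [PySem.List.pyRange_one_cons (by omega), List.find?_cons_of_pos hp]
    · rw [PySem.List.pyRange_one_cons (by omega),
        List.find?_cons_of_neg (by simp [hlt a h0 hlt'])]
      exact ih (a + 1) (by omega) (by omega) (by omega)

-- the while-loop mex
theorem pvMexWhile_eq (S : PySem.Set Int) (m : Int)
    (hk : ∀ k, 0 ≤ k → k < m → PySem.Set.contains S k = true)
    (hm : PySem.Set.contains S m = false) :
    ∀ (fuel : Nat) (c : Int), 0 ≤ c → c ≤ m →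
      m < c + (fuel : Int) → pvMexWhile S c fuel = m := by
  intro fuel
  induction fuel with
  | zero => intro c _ h1 h2; omega
  | succ f ih =>
    intro c hc0 h1 h2
    rcases eq_or_lt_of_le h1 with he | hlt'
    · subst he
      simp only [pvMexWhile, hm, Bool.false_eq_true, if_false]
    · rw [pvMexWhile, hk c hc0 hlt']
      simp only [if_true]
      exact ih (c + 1) (by omega) (by omega) (by omega)

-- the marking loop preserves the length of used_colors
theorem pvFoldSet_length (P : Int → Prop) [DecidablePred P] (idx : Int → Nat) :
    ∀ (L : List Int) (u : List Bool),
      (L.foldl (fun used j => if P j then used.set (idx j) true else used) u).length = u.length := by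
  intro L
  induction L with
  | nil => simp
  | cons j L ih =>
    intro u
    simp only [List.foldl_cons]
    by_cases hP : P j
    · rw [if_pos hP, ih]; simp
    · rw [if_neg hP, ih]

-- a guarded counting loop is the plain counting loop over the filtered keys
theorem pvFoldIfModify (Q : Int → Prop) [DecidablePred Q] (key : Int → Int) :
    ∀ (L : List Int) (d : PySem.Dict Int Int),
      (L.foldl (fun d j => if Q j then d.modify (key j) 0 (· + 1) else d) d)
        = (L.filterMap (fun j => if Q j then some (key j) else none)).foldl
            (fun d x => d.modify x 0 (· + 1)) d := by
  intro L
  induction L with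
  | nil => simp
  | cons j L ih =>
    intro d
    by_cases hQ : Q j <;> simp [hQ, ih]

-- one greedy step: A's boolean-array scan and B's set-mex produce the same color
theorem pvStep1_core (adj : List (List Int)) (cb r : List Int)
    (hr : adj[cb.length]? = some r)
    (hone : ∀ j : Nat, j < r.length → adj.length ≤ j → r.getD j 0 ≠ 1)
    (hv : cb.length < adj.length) (hgood : pvGood cb) :
    ∃ m : Nat, (m : Int) ≤ (cb.length : Int)
      ∧ pvFindSmallest adj (cb ++ List.replicate (adj.length - cb.length) (-1)) (cb.length : Int)
          = (m : Int)
      ∧ pvGreedyStepB cb (cb.length : Int) r = cb ++ [(m : Int)] := by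
  set n := adj.length with hn
  set v := cb.length with hvdef
  set colorsA := cb ++ List.replicate (n - v) (-1) with hca
  -- reading the padded color list
  have hread : ∀ j : Int, 0 ≤ j → j < (n : Int) →
      PySem.List.pyGetD colorsA j 0 = if j < (v : Int) then cb.getD j.toNat 0 else -1 := by
    intro j h0 h1
    rw [PySem.List.pyGetD_of_nonneg _ _ h0, hca]
    by_cases hj : j < (v : Int)
    · rw [if_pos hj, List.getD_append _ _ _ _ (by omega)]
    · rw [if_neg hj, List.getD_append_right _ _ _ _ (by omega)]
      have hlt : j.toNat - cb.length < n - v := by omega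
      simp [List.getD_eq_getElem?_getD, hlt]
  -- the key list B builds its set from
  set lst := (PySem.List.enumerate r 0).filterMap
      (fun ja => if ja.2 = 1 ∧ ja.1 < (v : Int) then some (PySem.List.pyGetD cb ja.1 0) else none)
    with hlstdef
  have hlst : ∀ x, x ∈ lst ↔ ∃ j : Int, 0 ≤ j ∧ j < (r.length : Int) ∧ j < (v : Int)
      ∧ r.getD j.toNat 0 = 1 ∧ x = cb.getD j.toNat 0 := by
    intro x
    rw [hlstdef, pvEnumerate_eq (0 : Int) r 0, List.filterMap_map, List.mem_filterMap]
    constructor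
    · rintro ⟨j, hj, hx⟩
      rw [PySem.List.mem_pyRange_one] at hj
      simp only [Function.comp_apply] at hx
      split at hx
      · rename_i hcond
        have hxe : PySem.List.pyGetD cb j 0 = x := Option.some_inj.1 hx
        refine ⟨j, by omega, by omega, hcond.2, by simpa using hcond.1, ?_⟩
        rw [← hxe, PySem.List.pyGetD_of_nonneg _ _ (by omega)]
      · exact absurd hx (by simp)
    · rintro ⟨j, h0, h1, h2, h3, h4⟩
      refine ⟨j, by rw [PySem.List.mem_pyRange_one]; omega, ?_⟩
      simp only [Function.comp_apply]
      rw [if_pos (⟨by simpa using h3, h2⟩ : _ ∧ _)]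
      rw [PySem.List.pyGetD_of_nonneg _ _ h0, h4]
  have hmemlst : ∀ x ∈ lst, 0 ≤ x ∧ x < (v : Int) := by
    intro x hx
    rcases (hlst x).1 hx with ⟨j, h0, h1, h2, h3, h4⟩
    have := hgood j.toNat (by omega)
    constructor
    · omega
    · have : cb.getD j.toNat 0 ≤ (j.toNat : Int) := this.2
      omega
  -- pigeonhole: some color in [0, v] is not in lst
  have hex : ∃ c : Nat, (c : Int) ∉ lst ∧ c ≤ v := by
    by_contra hcon
    push Not at hcon
    have hall : ∀ c : Nat, c ≤ v → (c : Int) ∈ lst := by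
      intro c hc
      by_contra h
      exact absurd hc (Nat.not_le.2 (hcon c h))
    have hsub : lst.toFinset ⊆ (Finset.range v).image (fun j : Nat => cb.getD j 0) := by
      intro x hx
      rcases (hlst x).1 (List.mem_toFinset.1 hx) with ⟨j, h0, h1, h2, h3, h4⟩
      exact Finset.mem_image.2 ⟨j.toNat, Finset.mem_range.2 (by omega), h4.symm⟩
    have hsub2 : (Finset.range (v + 1)).image (fun c : Nat => (c : Int)) ⊆ lst.toFinset := by
      intro x hx
      rcases Finset.mem_image.1 hx with ⟨c, hc, rfl⟩
      exact List.mem_toFinset.2 (hall c (Nat.lt_succ_iff.1 (Finset.mem_range.1 hc)))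
    have h1 : ((Finset.range (v + 1)).image (fun c : Nat => (c : Int))).card = v + 1 := by
      rw [Finset.card_image_of_injective _ (fun a b => by omega), Finset.card_range]
    have h2 : lst.toFinset.card ≤ v := by
      calc lst.toFinset.card ≤ ((Finset.range v).image (fun j : Nat => cb.getD j 0)).card :=
            Finset.card_le_card hsub
        _ ≤ v := le_trans (Finset.card_image_le) (by simp)
    have := Finset.card_le_card hsub2
    omega
  have hex' : ∃ c : Nat, (c : Int) ∉ lst := ⟨hex.choose, hex.choose_spec.1⟩
  set m := Nat.find hex' with hmdef
  have hmnot : (m : Int) ∉ lst := Nat.find_spec hex'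
  have hmin : ∀ k : Nat, k < m → (k : Int) ∈ lst := by
    intro k hk
    by_contra hno
    exact absurd (Nat.find_le (h := hex') hno) (by omega)
  have hmv : m ≤ v := le_trans (Nat.find_min' hex' hex.choose_spec.1) hex.choose_spec.2
  have hrvn : adj[v] = r := by
    rcases List.getElem?_eq_some_iff.1 hr with ⟨h, he⟩
    exact he
  have hrow : PySem.List.pyGetD adj ((v : Nat) : Int) [] = r := by
    rw [PySem.List.pyGetD_eq_getElem adj [] (by omega) (by exact_mod_cast hv)]
    simpa using hrvn
  refine ⟨m, by exact_mod_cast hmv, ?_, ?_⟩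
  · -- A's side
    have hlenu : (pvUsedColors adj colorsA (v : Int)).length = n := by
      simp only [pvUsedColors, hrow]
      rw [pvFoldSet_length]
      simp only [List.length_replicate, hn]
    have hused : ∀ c : Nat, c < n →
        (pvUsedColors adj colorsA (v : Int)).getD c false = decide ((c : Int) ∈ lst) := by
      intro c hc
      simp only [pvUsedColors, hrow]
      rw [pvFoldSet_getD (fun j => PySem.List.pyGetD r j 0 = 1 ∧ PySem.List.pyGetD colorsA j 0 ≠ -1)
          (fun j => (PySem.List.pyGetD colorsA j 0).toNat) _ _ c (by simpa using hc)]
      have hrep : (List.replicate adj.length false).getD c false = false := by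
        by_cases h : c < adj.length <;>
          simp [List.getD_eq_getElem?_getD, h]
      rw [hrep, Bool.false_or]
      by_cases hm : (c : Int) ∈ lst
      · rw [decide_eq_true hm, List.any_eq_true]
        rcases (hlst _).1 hm with ⟨j, h0, h1, h2, h3, h4⟩
        refine ⟨j, PySem.List.mem_pyRange_one.2 (by omega), ?_⟩
        have hgj := hgood j.toNat (by omega)
        have hrj : PySem.List.pyGetD colorsA j 0 = cb.getD j.toNat 0 := by
          rw [hread j h0 (by omega), if_pos h2]
        simp only [Bool.and_eq_true, beq_iff_eq, decide_eq_true_eq]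
        refine ⟨⟨?_, ?_⟩, ?_⟩
        · rw [PySem.List.pyGetD_of_nonneg _ _ h0]; exact h3
        · rw [hrj]; omega
        · rw [hrj]; omega
      · rw [decide_eq_false hm, List.any_eq_false]
        rintro j hj
        rw [PySem.List.mem_pyRange_one] at hj
        simp only [Bool.and_eq_true, beq_iff_eq, decide_eq_true_eq, not_and]
        rintro ⟨hj1, hj2⟩ hidx
        have hjn : j < (n : Int) := by
          by_contra hge
          refine hone j.toNat (by omega) (by omega) ?_
          rw [← PySem.List.pyGetD_of_nonneg r (d := 0) (by omega : (0:Int) ≤ j)]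
          exact hj1
        by_cases hjv : j < (v : Int)
        · have hrj : PySem.List.pyGetD colorsA j 0 = cb.getD j.toNat 0 := by
            rw [hread j (by omega) (by omega), if_pos hjv]
          have hgj := hgood j.toNat (by omega)
          apply hm
          refine (hlst _).2 ⟨j, by omega, by omega, hjv, ?_, ?_⟩
          · rw [← PySem.List.pyGetD_of_nonneg r (d := 0) (by omega : (0:Int) ≤ j)]; exact hj1
          · rw [hrj] at hidx; omega
        · rw [hread j (by omega) (by omega), if_neg hjv] at hj2
          exact hj2 rfl
    -- now run the find?
    simp only [pvFindSmallest]
    rw [pvFind?_pyRange (fun c => !(PySem.List.pyGetD (pvUsedColors adj colorsA (v : Int)) c false))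
        0 ((pvUsedColors adj colorsA (v : Int)).length : Int) (m : Int)
        (by
          show (!(PySem.List.pyGetD (pvUsedColors adj colorsA (v : Int)) (m : Int) false)) = true
          rw [PySem.List.pyGetD_of_nonneg _ _ (by omega)]
          simp only [Int.toNat_natCast]
          rw [hused m (by omega)]
          simp [hmnot])
        (by
          intro k h0 hkm
          show (!(PySem.List.pyGetD (pvUsedColors adj colorsA (v : Int)) k false)) = false
          rw [PySem.List.pyGetD_of_nonneg _ _ h0]
          have hke : k = ((k.toNat : Nat) : Int) := by omega
          rw [hke, Int.toNat_natCast]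
          rw [hused k.toNat (by omega)]
          simp only [Bool.not_eq_false', decide_eq_true_eq]
          have := hmin k.toNat (by omega)
          simpa using this)
        (by rw [hlenu]; exact_mod_cast (by omega : (m:Int) < (n:Int)))
        (m + 1) 0 (by omega) (by omega) (by omega)]
  · -- B's side
    simp only [pvGreedyStepB]
    rw [← hlstdef]
    congr 1
    have hcontains : ∀ x : Int, (PySem.Set.ofList lst).contains x = true ↔ x ∈ lst := by
      intro x
      rw [PySem.Set.contains_iff, PySem.Set.mem_ofList]
    have hfuel : m ≤ (PySem.Set.ofList lst).length := by
      have hsub : ((List.range m).map (fun k : Nat => (k : Int))) ⊆ PySem.Set.ofList lst := by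
        intro x hx
        rcases List.mem_map.1 hx with ⟨k, hk, rfl⟩
        exact (PySem.Set.mem_ofList _ _).2 (hmin k (List.mem_range.1 hk))
      have hnd : ((List.range m).map (fun k : Nat => (k : Int))).Nodup :=
        List.Nodup.map (fun a b h => by omega) (List.nodup_range)
      have := List.Subperm.length_le (List.subperm_of_subset hnd hsub)
      simpa using this
    rw [pvMexWhile_eq (PySem.Set.ofList lst) (m : Int)
        (fun k h0 hk => (hcontains k).2 (by
          have hke : k = ((k.toNat : Nat) : Int) := by omega
          rw [hke]; exact hmin k.toNat (by omega)))
        (Bool.eq_false_iff.2 (fun h => hmnot ((hcontains _).1 h)))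
        ((PySem.Set.ofList lst).length + 1) 0 le_rfl (by omega) (by push_cast; omega)]
-- one greedy step, with the padding of the not-yet-colored suffix
theorem pvStep1_full (adj : List (List Int)) (cb r : List Int) (v : Nat)
    (hlen : cb.length = v) (hr : adj[v]? = some r)
    (hone : ∀ j : Nat, j < r.length → adj.length ≤ j → r.getD j 0 ≠ 1)
    (hv : v < adj.length) (hgood : pvGood cb) :
    (cb ++ List.replicate (adj.length - v) (-1)).set v
        (pvFindSmallest adj (cb ++ List.replicate (adj.length - v) (-1)) (v : Int))
      = pvGreedyStepB cb (v : Int) r ++ List.replicate (adj.length - (v + 1)) (-1)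
    ∧ pvGood (pvGreedyStepB cb (v : Int) r)
    ∧ (pvGreedyStepB cb (v : Int) r).length = v + 1 := by
  subst hlen
  obtain ⟨m, hm, hA, hB⟩ := pvStep1_core adj cb r hr hone hv hgood
  refine ⟨?_, ?_, ?_⟩
  · rw [hA, hB]
    have hrep : List.replicate (adj.length - cb.length) (-1 : Int)
        = -1 :: List.replicate (adj.length - (cb.length + 1)) (-1) := by
      rw [← List.replicate_succ]
      congr 1
      omega
    rw [hrep, List.set_append, if_neg (by omega)]
    simp
  · rw [hB]
    intro j hj
    rw [List.length_append, List.length_singleton] at hj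
    by_cases hjv : j < cb.length
    · rw [List.getD_append _ _ _ _ hjv]
      exact hgood j hjv
    · have hje : j = cb.length := by omega
      subst hje
      rw [List.getD_append_right _ _ _ _ (le_refl _)]
      simp only [Nat.sub_self, List.getD_cons_zero]
      exact ⟨Int.natCast_nonneg m, hm⟩
  · rw [hB]
    simp

-- phase-1 simulation: A's range loop over the padded array tracks B's append loop
theorem pvSim1 (adj : List (List Int))
    (hpre : ∀ row ∈ adj, ∀ j : Nat, j < row.length → adj.length ≤ j → row.getD j 0 ≠ 1) :
    ∀ (l : List (List Int)) (v : Nat) (cb : List Int),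
      adj.drop v = l → cb.length = v → v ≤ adj.length → pvGood cb →
      ((PySem.List.pyRange (v : Int) (adj.length : Int) 1).foldl
          (fun colors vertex => colors.set vertex.toNat (pvFindSmallest adj colors vertex))
          (cb ++ List.replicate (adj.length - v) (-1))
        = (PySem.List.enumerate l (v : Int)).foldl (fun c vr => pvGreedyStepB c vr.1 vr.2) cb)
      ∧ pvGood ((PySem.List.enumerate l (v : Int)).foldl (fun c vr => pvGreedyStepB c vr.1 vr.2) cb)
      ∧ ((PySem.List.enumerate l (v : Int)).foldl (fun c vr => pvGreedyStepB c vr.1 vr.2) cb).length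
          = adj.length := by
  intro l
  induction l with
  | nil =>
    intro v cb hdrop hlen hle hg
    have hvn : adj.length ≤ v := List.drop_eq_nil_iff.1 hdrop
    rw [PySem.List.pyRange_one_eq_nil (by exact_mod_cast hvn), PySem.List.enumerate_nil]
    simp only [List.foldl_nil]
    refine ⟨?_, hg, by omega⟩
    rw [show adj.length - v = 0 by omega]
    simp
  | cons r l' ih =>
    intro v cb hdrop hlen hle hg
    have hvlt : v < adj.length := by
      by_contra h
      rw [List.drop_eq_nil_of_le (by omega)] at hdrop
      cases hdrop
    have hr : adj[v]? = some r := by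
      have h0 : (adj.drop v)[0]? = some r := by rw [hdrop]; rfl
      rw [List.getElem?_drop] at h0
      simpa using h0
    have hl' : adj.drop (v + 1) = l' := by
      have ht : (adj.drop v).tail = l' := by rw [hdrop]; rfl
      rw [← ht, List.tail_drop]
    have hone : ∀ j : Nat, j < r.length → adj.length ≤ j → r.getD j 0 ≠ 1 := by
      refine hpre r (List.mem_of_mem_drop (i := v) ?_)
      rw [hdrop]
      exact List.mem_cons_self
    obtain ⟨hset, hgood', hlen'⟩ := pvStep1_full adj cb r v hlen hr hone hvlt hg
    rw [PySem.List.pyRange_one_cons (by exact_mod_cast hvlt), PySem.List.enumerate_cons]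
    simp only [List.foldl_cons, Int.toNat_natCast]
    rw [hset]
    have hcast : ((v : Int) + 1) = (((v + 1 : Nat)) : Int) := by push_cast; ring
    rw [hcast]
    exact ih (v + 1) (pvGreedyStepB cb (v : Int) r) hl' hlen' (by omega) hgood'

-- A's inner candidate loop and B's argmin pass stay in lockstep: A's running minimum is B's
-- plus the constant self-loop offset s
theorem pvArgmin_sim (row colors : List Int) (vertex orig s : Int) (cnt : PySem.Dict Int Int)
    (hg : ∀ c, pvConflicts row (colors.set vertex.toNat c) c = s + cnt.getD c 0) :
    ∀ (L : List Int) (stA : Int × Option Int) (stB : Option Int × Option Int),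
      ((stA = (orig, none) ∧ stB = (none, none)) ∨
        (∃ bb k, stA = (bb, some (s + k)) ∧ stB = (some bb, some k))) →
      ((L.foldl (pvLocalBody row colors vertex orig) stA = (orig, none)
          ∧ L.foldl (pvSearchBody cnt orig) stB = (none, none)) ∨
        (∃ bb k, L.foldl (pvLocalBody row colors vertex orig) stA = (bb, some (s + k))
          ∧ L.foldl (pvSearchBody cnt orig) stB = (some bb, some k))) := by
  intro L
  induction L with
  | nil => intro stA stB h; simpa using h
  | cons c L ih =>
    intro stA stB h
    simp only [List.foldl_cons]
    apply ih
    by_cases hc : c = orig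
    · simpa only [pvLocalBody, pvSearchBody, if_pos hc] using h
    · rcases h with ⟨hA, hB⟩ | ⟨bb, k, hA, hB⟩
      · rw [hA, hB]
        right
        refine ⟨c, cnt.getD c 0, ?_, ?_⟩
        · simp only [pvLocalBody, if_neg hc, hg c]
        · simp only [pvSearchBody, if_neg hc]
      · rw [hA, hB]
        right
        by_cases hlt : cnt.getD c 0 < k
        · refine ⟨c, cnt.getD c 0, ?_, ?_⟩
          · simp only [pvLocalBody, if_neg hc, hg c]
            rw [if_pos (by omega)]
          · simp only [pvSearchBody, if_neg hc]
            rw [if_pos hlt]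
        · refine ⟨bb, k, ?_, ?_⟩
          · simp only [pvLocalBody, if_neg hc, hg c]
            rw [if_neg (by omega)]
          · simp only [pvSearchBody, if_neg hc]
            rw [if_neg hlt]

-- B's per-vertex step keeps the list length
theorem pvLen_searchStepB (n : Int) (colors : List Int) (v : Int) (r : List Int) :
    (pvSearchStepB n colors v r).length = colors.length := by
  simp only [pvSearchStepB]
  split <;> simp

-- one local-search step: A's recount-per-candidate equals B's count-once argmin
theorem pvStep2_eq (adj : List (List Int)) (colors : List Int) (v : Nat) (r : List Int)
    (hlen : colors.length = adj.length) (hv : v < adj.length)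
    (hr : adj[v]? = some r) :
    pvLocalStep adj (adj.length : Int) colors (v : Int)
      = pvSearchStepB (adj.length : Int) colors (v : Int) r := by
  have hrvn : adj[v] = r := by
    rcases List.getElem?_eq_some_iff.1 hr with ⟨h, he⟩
    exact he
  have hrow : PySem.List.pyGetD adj ((v : Nat) : Int) [] = r := by
    rw [PySem.List.pyGetD_eq_getElem adj [] (by omega) (by exact_mod_cast hv)]
    simpa using hrvn
  have hvc : v < colors.length := by omega
  simp only [pvLocalStep, pvSearchStepB, hrow]
  set cnt : PySem.Dict Int Int := (PySem.List.enumerate r 0).foldl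
      (fun d ja => if ja.2 = 1 ∧ ja.1 ≠ (v : Int)
        then d.modify (PySem.List.pyGetD colors ja.1 0) 0 (· + 1) else d)
      PySem.Dict.empty with hcntdef
  set keylist := (PySem.List.pyRange 0 (r.length : Int) 1).filterMap
      (fun j => if r.getD j.toNat 0 = 1 ∧ j ≠ (v : Int)
        then some (PySem.List.pyGetD colors j 0) else none) with hkeydef
  have hcnt : ∀ c : Int, cnt.getD c 0 = (keylist.count c : Int) := by
    intro c
    rw [hcntdef]
    simp only [pvEnumerate_eq (0 : Int) r 0, List.foldl_map, zero_add, sub_zero]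
    rw [pvFoldIfModify (fun j => r.getD j.toNat 0 = 1 ∧ j ≠ (v : Int))
        (fun j => PySem.List.pyGetD colors j 0), ← hkeydef,
      PySem.Dict.getD_foldl_modify_add_one]
    simp
  -- pointwise relation between A's conflict predicate and B's key predicate
  have hpoint : ∀ (c j : Int), 0 ≤ j → j ≠ (v : Int) →
      (decide (PySem.List.pyGetD r j 0 = 1 ∧ PySem.List.pyGetD (colors.set v c) j 0 = c))
        = ((if r.getD j.toNat 0 = 1 ∧ j ≠ (v : Int)
            then some (PySem.List.pyGetD colors j 0) else none) == some c) := by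
    intro c j h0 hne
    have e1 : PySem.List.pyGetD r j 0 = r.getD j.toNat 0 := PySem.List.pyGetD_of_nonneg _ _ h0
    have e2 : PySem.List.pyGetD (colors.set v c) j 0 = PySem.List.pyGetD colors j 0 := by
      rw [PySem.List.pyGetD_of_nonneg _ _ h0, PySem.List.pyGetD_of_nonneg _ _ h0]
      simp only [List.getD_eq_getElem?_getD, List.getElem?_set]
      rw [if_neg (by omega)]
    rw [e1, e2]
    simp only [List.getD_eq_getElem?_getD]
    by_cases h1 : r[j.toNat]?.getD 0 = 1
    · by_cases h2 : PySem.List.pyGetD colors j 0 = c <;> simp [h1, h2, hne]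
    · simp [h1]
  have hself : ∀ c : Int, PySem.List.pyGetD (colors.set v c) ((v : Nat) : Int) 0 = c := by
    intro c
    rw [PySem.List.pyGetD_of_nonneg _ _ (by omega)]
    simp only [Int.toNat_natCast, List.getD_eq_getElem?_getD, List.getElem?_set]
    simp [hvc]
  have hrv : PySem.List.pyGetD r ((v : Nat) : Int) 0 = r.getD v 0 := by
    rw [PySem.List.pyGetD_of_nonneg _ _ (by omega)]
    simp
  -- count over the range: A's predicate vs B's key predicate, off by the self-loop term
  have hcountP : ∀ c : Int,
      (PySem.List.pyRange 0 (r.length : Int) 1).countP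
          (fun j => decide (PySem.List.pyGetD r j 0 = 1
            ∧ PySem.List.pyGetD (colors.set v c) j 0 = c))
        = (if ((v : Int) < (r.length : Int) ∧ r.getD v 0 = 1) then 1 else 0)
          + (PySem.List.pyRange 0 (r.length : Int) 1).countP
              (fun j => ((if r.getD j.toNat 0 = 1 ∧ j ≠ (v : Int)
                then some (PySem.List.pyGetD colors j 0) else none) == some c)) := by
    intro c
    by_cases hvr : (v : Int) < (r.length : Int)
    · rw [PySem.List.pyRange_one_append 0 (v : Int) (r.length : Int) (by omega) (by omega),
        PySem.List.pyRange_one_cons hvr]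
      simp only [List.countP_append, List.countP_cons]
      have c1 : (PySem.List.pyRange 0 (v : Int) 1).countP
            (fun j => decide (PySem.List.pyGetD r j 0 = 1
              ∧ PySem.List.pyGetD (colors.set v c) j 0 = c))
          = (PySem.List.pyRange 0 (v : Int) 1).countP
              (fun j => ((if r.getD j.toNat 0 = 1 ∧ j ≠ (v : Int)
                then some (PySem.List.pyGetD colors j 0) else none) == some c)) := by
        refine List.countP_congr ?_
        intro j hj
        rw [PySem.List.mem_pyRange_one] at hj
        rw [hpoint c j (by omega) (by omega)]
      have c2 : (PySem.List.pyRange ((v : Int) + 1) (r.length : Int) 1).countP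
            (fun j => decide (PySem.List.pyGetD r j 0 = 1
              ∧ PySem.List.pyGetD (colors.set v c) j 0 = c))
          = (PySem.List.pyRange ((v : Int) + 1) (r.length : Int) 1).countP
              (fun j => ((if r.getD j.toNat 0 = 1 ∧ j ≠ (v : Int)
                then some (PySem.List.pyGetD colors j 0) else none) == some c)) := by
        refine List.countP_congr ?_
        intro j hj
        rw [PySem.List.mem_pyRange_one] at hj
        rw [hpoint c j (by omega) (by omega)]
      rw [c1, c2, hrv, hself c]
      by_cases h1 : r.getD v 0 = 1 <;> simp [h1, hvr] <;> omega
    · rw [if_neg (fun hcon => hvr hcon.1), zero_add]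
      refine List.countP_congr ?_
      intro j hj
      rw [PySem.List.mem_pyRange_one] at hj
      rw [hpoint c j (by omega) (by omega)]
  -- A's conflict count for a candidate = self-loop offset + B's dictionary count
  have hconf : ∀ c : Int, pvConflicts r (colors.set ((v : Int)).toNat c) c
      = (if ((v : Int) < (r.length : Int) ∧ r.getD v 0 = 1) then (1 : Int) else 0)
        + cnt.getD c 0 := by
    intro c
    rw [hcnt c]
    simp only [Int.toNat_natCast, pvConflicts]
    rw [PySem.List.foldl_congr_mem _ _
        (fun acc j => if (fun j => decide (PySem.List.pyGetD r j 0 = 1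
          ∧ PySem.List.pyGetD (colors.set v c) j 0 = c)) j = true then acc + 1 else acc) 0
        (by intro acc j hj; simp)]
    rw [PySem.List.foldl_count_if, hcountP c, hkeydef, List.count_filterMap]
    by_cases h1 : ((v : Int) < (r.length : Int) ∧ r.getD v 0 = 1) <;> simp [h1]
  rcases pvArgmin_sim r colors (v : Int) (PySem.List.pyGetD colors ((v : Nat) : Int) 0)
      (if ((v : Int) < (r.length : Int) ∧ r.getD v 0 = 1) then (1 : Int) else 0) cnt hconf
      (PySem.List.pyRange 0 (adj.length : Int) 1)
      (PySem.List.pyGetD colors ((v : Nat) : Int) 0, none) (none, none)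
      (Or.inl ⟨rfl, rfl⟩) with ⟨hA, hB⟩ | ⟨bb, k, hA, hB⟩
  · rw [hA, hB]
    show colors.set ((v : Int)).toNat (PySem.List.pyGetD colors ((v : Nat) : Int) 0) = colors
    have horig : PySem.List.pyGetD colors ((v : Nat) : Int) 0 = colors[v] := by
      rw [PySem.List.pyGetD_eq_getElem colors 0 (by omega) (by exact_mod_cast hvc)]
      simp
    rw [horig]
    simp only [Int.toNat_natCast]
    exact List.set_getElem_self hvc
  · rw [hA, hB]

-- phase-2 simulation: A's range loop tracks B's enumerate loop
theorem pvSim2 (adj : List (List Int)) :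
    ∀ (l : List (List Int)) (v : Nat) (colors : List Int),
      adj.drop v = l → colors.length = adj.length →
      (PySem.List.pyRange (v : Int) (adj.length : Int) 1).foldl
          (pvLocalStep adj (adj.length : Int)) colors
        = (PySem.List.enumerate l (v : Int)).foldl
            (fun c vr => pvSearchStepB (adj.length : Int) c vr.1 vr.2) colors := by
  intro l
  induction l with
  | nil =>
    intro v colors hdrop hlen
    have hvn : adj.length ≤ v := List.drop_eq_nil_iff.1 hdrop
    rw [PySem.List.pyRange_one_eq_nil (by exact_mod_cast hvn), PySem.List.enumerate_nil]
    rfl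
  | cons r l' ih =>
    intro v colors hdrop hlen
    have hvlt : v < adj.length := by
      by_contra h
      rw [List.drop_eq_nil_of_le (by omega)] at hdrop
      cases hdrop
    have hr : adj[v]? = some r := by
      have h0 : (adj.drop v)[0]? = some r := by rw [hdrop]; rfl
      rw [List.getElem?_drop] at h0
      simpa using h0
    have hl' : adj.drop (v + 1) = l' := by
      have ht : (adj.drop v).tail = l' := by rw [hdrop]; rfl
      rw [← ht, List.tail_drop]
    rw [PySem.List.pyRange_one_cons (by exact_mod_cast hvlt), PySem.List.enumerate_cons]
    simp only [List.foldl_cons]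
    rw [pvStep2_eq adj colors v r hlen hvlt hr]
    have hcast : ((v : Int) + 1) = (((v + 1 : Nat)) : Int) := by push_cast; ring
    rw [hcast]
    exact ih (v + 1) _ hl' (by rw [pvLen_searchStepB]; exact hlen)

theorem hybrid_graph_coloring_spec : Claim_equal_hybrid_graph_coloring := by
  intro adj hdom hpre
  unfold Spec_hybrid_graph_coloring
  simp only [hybrid_graph_coloring, hybrid_graph_coloring_alt]
  obtain ⟨e1, hg1, hl1⟩ := pvSim1 adj hpre adj 0 [] (by simp) rfl (by omega)
    (fun j hj => absurd hj (by simp))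
  simp only [Nat.cast_zero, List.nil_append, Nat.sub_zero] at e1 hl1
  rw [e1]
  have e2 := pvSim2 adj adj 0
    ((PySem.List.enumerate adj 0).foldl (fun c vr => pvGreedyStepB c vr.1 vr.2) []) (by simp)
  simp only [Nat.cast_zero] at e2
  exact e2 hl1
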